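-- pv_equiv track=rewrite | github.com/SonoraKeto/keto-recipe-generator-v15 | recipegen/usda.py | _best_result
-- ===== SOURCE A (Python) =====
-- from typing import Optional, Dict, Any, List
--
-- def _best_result(results: List[dict]) -> Optional[dict]:
--     if not results:
--         return None
--     preferred = ["SR Legacy", "Foundation", "Survey (FNDDS)"]
--     for p in preferred:
--         for r in results:
--             if r.get("dataType") == p:
--                 return r
--     return results[0]
-- ===== SOURCE B (Python) =====
-- def _best_result(results):
--     if not results:
--         return None
--     rank = {"SR Legacy": 0, "Foundation": 1, "Survey (FNDDS)": 2}
--     best = None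
--     best_rank = 3
--     for r in results:
--         k = rank.get(r.get("dataType"), 3)
--         if k < best_rank:
--             best, best_rank = r, k
--     return best if best_rank < 3 else results[0]
-- ===== Notes on version B (the rewrite author's own statement) =====
-- stated objective: alternative
-- what changed: Replaced the three sequential scans (one per preferred dataType) by a single pass that keeps the earliest result of minimal priority rank, falling back to results[0] when nothing matched.
import Mathlib
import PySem

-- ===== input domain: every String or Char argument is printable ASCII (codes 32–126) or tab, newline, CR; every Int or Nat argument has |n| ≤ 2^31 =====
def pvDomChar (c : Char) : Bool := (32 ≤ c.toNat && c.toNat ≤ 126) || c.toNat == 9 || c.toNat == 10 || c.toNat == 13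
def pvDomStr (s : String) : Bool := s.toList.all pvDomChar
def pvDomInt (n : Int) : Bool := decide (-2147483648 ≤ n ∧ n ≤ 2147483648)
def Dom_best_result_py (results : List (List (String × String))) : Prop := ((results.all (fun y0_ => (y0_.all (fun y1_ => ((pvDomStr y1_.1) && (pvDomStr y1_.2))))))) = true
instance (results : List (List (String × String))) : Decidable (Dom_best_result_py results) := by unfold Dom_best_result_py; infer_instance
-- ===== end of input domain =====

-- B replaces A's three sequential scans (one per preferred dataType) by a single pass that keeps
-- the earliest result of minimal priority rank; an alternative decomposition of the same task.

-- ===== PORT A =====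
-- r.get("dataType") == p : dict lookup; a missing key gives None, and None == p is False
def pvGetDT (r : List (String × String)) : Option String :=
  (PySem.Dict.mk r).get? "dataType"

-- inner loop: for r in results: if r.get("dataType") == p: return r
def pvInnerA (p : String) : List (List (String × String)) → Option (List (String × String))
  | [] => none
  | r :: rs => if pvGetDT r = some p then some r else pvInnerA p rs

-- outer loop: for p in preferred: … (an early return propagates out)
def pvOuterA : List String → List (List (String × String)) → Option (List (String × String))
  | [], _ => none
  | p :: ps, results =>
    match pvInnerA p results with
    | some r => some r
    | none => pvOuterA ps results

def best_result_py (results : List (List (String × String))) : Option (List (String × String)) :=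
  match results with
  | [] => none
  | r0 :: _ =>
    match pvOuterA ["SR Legacy", "Foundation", "Survey (FNDDS)"] results with
    | some r => some r
    | none => some r0

-- ===== PORT B =====
-- rank = {"SR Legacy": 0, "Foundation": 1, "Survey (FNDDS)": 2}
def pvRankD : PySem.Dict String Int :=
  PySem.Dict.mk [("SR Legacy", 0), ("Foundation", 1), ("Survey (FNDDS)", 2)]

-- k = rank.get(r.get("dataType"), 3): a missing "dataType" (None) never matches a string key
def pvRankOf (r : List (String × String)) : Int :=
  match pvGetDT r with
  | none => 3
  | some s => pvRankD.getD s 3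

-- loop body: if k < best_rank: best, best_rank = r, k
def pvStepB (st : Option (List (String × String)) × Int) (r : List (String × String)) :
    Option (List (String × String)) × Int :=
  if pvRankOf r < st.2 then (some r, pvRankOf r) else st

def best_result_py_alt (results : List (List (String × String))) : Option (List (String × String)) :=
  match results with
  | [] => none
  | r0 :: _ =>
    let st := results.foldl pvStepB (none, 3)
    if st.2 < 3 then st.1 else some r0

-- ===== PRECONDITION & SPEC =====
def Spec_best_result_py (results : List (List (String × String))) (out : Option (List (String × String))) : Prop := out = best_result_py_alt results
instance (results : List (List (String × String))) (out : Option (List (String × String))) : Decidable (Spec_best_result_py results out) := by unfold Spec_best_result_py; infer_instance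

-- ===== CLAIM (what is proved, stated in full; the proofs are below) =====
def Claim_equal_best_result_py : Prop := ∀ (results : List (List (String × String))), Dom_best_result_py results → Spec_best_result_py results (best_result_py results)

-- ===== LEMMAS AND PROOFS =====

theorem pvRank_cases (r : List (String × String)) :
    (pvRankOf r = 0 ∧ pvGetDT r = some "SR Legacy") ∨
    (pvRankOf r = 1 ∧ pvGetDT r = some "Foundation") ∨
    (pvRankOf r = 2 ∧ pvGetDT r = some "Survey (FNDDS)") ∨
    (pvRankOf r = 3 ∧ pvGetDT r ≠ some "SR Legacy" ∧ pvGetDT r ≠ some "Foundation" ∧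
      pvGetDT r ≠ some "Survey (FNDDS)") := by
  unfold pvRankOf
  cases h : pvGetDT r with
  | none => simp
  | some s =>
    by_cases h0 : s = "SR Legacy"
    · subst h0; left; exact ⟨by decide, rfl⟩
    · by_cases h1 : s = "Foundation"
      · subst h1; right; left; exact ⟨by decide, rfl⟩
      · by_cases h2 : s = "Survey (FNDDS)"
        · subst h2; right; right; left; exact ⟨by decide, rfl⟩
        · right; right; right
          refine ⟨?_, by simp [h0], by simp [h1], by simp [h2]⟩
          have e0 : ("SR Legacy" == s) = false := by simp [Ne.symm h0]
          have e1 : ("Foundation" == s) = false := by simp [Ne.symm h1]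
          have e2 : ("Survey (FNDDS)" == s) = false := by simp [Ne.symm h2]
          simp [pvRankD, PySem.Dict.get?, PySem.Dict.getD_eq_get?_getD, e0, e1, e2]

theorem pvLoop_char (xs : List (List (String × String)))
    (b : Option (List (String × String))) (br : Int)
    (hbr : br = 0 ∨ br = 1 ∨ br = 2 ∨ br = 3) :
    xs.foldl pvStepB (b, br) =
      if 0 < br ∧ (pvInnerA "SR Legacy" xs).isSome then (pvInnerA "SR Legacy" xs, 0)
      else if 1 < br ∧ (pvInnerA "Foundation" xs).isSome then (pvInnerA "Foundation" xs, 1)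
      else if 2 < br ∧ (pvInnerA "Survey (FNDDS)" xs).isSome then (pvInnerA "Survey (FNDDS)" xs, 2)
      else (b, br) := by
  induction xs generalizing b br with
  | nil => simp [pvInnerA]
  | cons r rs ih =>
    rcases pvRank_cases r with ⟨hk, hg⟩ | ⟨hk, hg⟩ | ⟨hk, hg⟩ | ⟨hk, hg0, hg1, hg2⟩
    · rcases hbr with h3 | h3 | h3 | h3 <;> subst h3 <;>
        simp only [List.foldl_cons, pvStepB, hk] <;> (try norm_num) <;>
        (try rw [ih _ _ (by norm_num)]) <;> (try simp only [pvInnerA, hg]) <;> (try norm_num)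
    · rcases hbr with h3 | h3 | h3 | h3 <;> subst h3 <;>
        simp only [List.foldl_cons, pvStepB, hk] <;> (try norm_num) <;>
        (try rw [ih _ _ (by norm_num)]) <;> (try simp only [pvInnerA, hg]) <;> (try norm_num) <;>
        (try (by_cases c0 : (pvInnerA "SR Legacy" rs).isSome <;>
              by_cases c1 : (pvInnerA "Foundation" rs).isSome <;>
              by_cases c2 : (pvInnerA "Survey (FNDDS)" rs).isSome <;> simp_all))
    · rcases hbr with h3 | h3 | h3 | h3 <;> subst h3 <;>
        simp only [List.foldl_cons, pvStepB, hk] <;> (try norm_num) <;>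
        (try rw [ih _ _ (by norm_num)]) <;> (try simp only [pvInnerA, hg]) <;> (try norm_num) <;>
        (try (by_cases c0 : (pvInnerA "SR Legacy" rs).isSome <;>
              by_cases c1 : (pvInnerA "Foundation" rs).isSome <;>
              by_cases c2 : (pvInnerA "Survey (FNDDS)" rs).isSome <;> simp_all))
    · rcases hbr with h3 | h3 | h3 | h3 <;> subst h3 <;>
        simp only [List.foldl_cons, pvStepB, hk] <;> (try norm_num) <;>
        (try rw [ih _ _ (by norm_num)]) <;> (try simp only [pvInnerA, hg0, hg1, hg2]) <;> (try norm_num)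

-- ===== VERDICT (by name: the statement is the Claim_ definition above) =====
theorem best_result_py_spec : Claim_equal_best_result_py := by
  intro results _
  unfold Spec_best_result_py best_result_py best_result_py_alt
  cases results with
  | nil => rfl
  | cons r0 rs =>
    rw [pvLoop_char _ none 3 (by norm_num)]
    simp only [pvOuterA]
    cases h0 : pvInnerA "SR Legacy" (r0 :: rs) <;>
    cases h1 : pvInnerA "Foundation" (r0 :: rs) <;>
    cases h2 : pvInnerA "Survey (FNDDS)" (r0 :: rs) <;>
    simp_all
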